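-- pv_equiv track=rewrite | github.com/AntonioFalace01/CakeSortPuzzle3D | cake_sort_engine.py | _expand_events_to_hops
-- ===== SOURCE A (Python) =====
-- def _expand_events_to_hops(raw_events, visited_by_tipo=None):
--     """
--     Espande gli eventi non-adiacenti in hop adiacenti.
--
--     Per un evento (tipo, count, A→C) dove Manhattan(A,C) > 1:
--     cerca tra gli altri raw_events un from_pos B tale che:
--       - stesso tipo e stesso to_pos C
--       - adiacente ad A (Manhattan == 1)
--       - adiacente a C (Manhattan == 1)
--     Se trovato, spezza in (A→B) e (B→C).
--
--     Poi applica ordinamento topologico: X→Y deve precedere Y→Z.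
--     """
--
--     def manhattan(a, b):
--         return abs(a[0] - b[0]) + abs(a[1] - b[1])
--
--     # Passo 1: espandi hop non-adiacenti usando relay reali
--     raw_hops = []
--     for i, (tipo, count, from_pos, to_pos) in enumerate(raw_events):
--         if manhattan(from_pos, to_pos) == 1:
--             raw_hops.append((tipo, count, from_pos, to_pos))
--         else:
--             # Cerca relay B: altro raw_event con stesso tipo e stesso to_pos,
--             # il cui from_pos è adiacente sia a from_pos che a to_pos
--             relay = None
--             for j, (t2, c2, fp2, tp2) in enumerate(raw_events):
--                 if j == i:
--                     continue
--                 if t2 != tipo or tp2 != to_pos: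
--                     continue
--                 if manhattan(from_pos, fp2) == 1 and manhattan(fp2, to_pos) == 1:
--                     relay = fp2
--                     break
--             if relay:
--                 raw_hops.append((tipo, count, from_pos, relay))
--                 raw_hops.append((tipo, count, relay, to_pos))
--             else:
--                 # Nessun relay trovato: salto diretto (adiacenti ma logica strana)
--                 raw_hops.append((tipo, count, from_pos, to_pos))
--
--     # Passo 2: ordinamento topologico
--     # hop i dipende da hop j se: raw_hops[j].to_pos == raw_hops[i].from_pos
--     # e stesso tipo (j deve precedere i)
--     from collections import defaultdict, deque
--     n = len(raw_hops)
--     in_degree = [0] * n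
--     rdeps = defaultdict(list)  # rdeps[j] = lista di i che dipendono da j
--
--     for i in range(n):
--         ti, ci, fpi, tpi = raw_hops[i]
--         for j in range(n):
--             if j == i:
--                 continue
--             tj, cj, fpj, tpj = raw_hops[j]
--             if tj == ti and tpj == fpi:
--                 # j riempie fpi con tipo ti → i deve aspettare j
--                 in_degree[i] += 1
--                 rdeps[j].append(i)
--
--     queue = deque(idx for idx in range(n) if in_degree[idx] == 0)
--     ordered = []
--     while queue:
--         idx = queue.popleft()
--         ordered.append(raw_hops[idx])
--         for dep_i in rdeps[idx]:
--             in_degree[dep_i] -= 1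
--             if in_degree[dep_i] == 0:
--                 queue.append(dep_i)
--
--     # Se ci sono cicli (non dovrebbe), aggiungi il resto nell'ordine originale
--     if len(ordered) < n:
--         emitted_ids = set(id(h) for h in ordered)
--         for h in raw_hops:
--             if id(h) not in emitted_ids:
--                 ordered.append(h)
--
--     # Fondi hop consecutivi con stesso (tipo, from_pos, to_pos):
--     # es. [C1:(1,1)->(0,1), C2:(1,1)->(0,1)] -> [C3:(1,1)->(0,1)]
--     merged = []
--     for hop in ordered:
--         tipo, count, fp, tp = hop
--         if merged and merged[-1][0] == tipo and merged[-1][2] == fp and merged[-1][3] == tp: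
--             last = merged[-1]
--             merged[-1] = (last[0], last[1] + count, last[2], last[3])
--         else:
--             merged.append(list(hop))
--     # Converti in tuple
--     ordered = [tuple(h) for h in merged]
--
--     return ordered
-- ===== SOURCE B (Python) =====
-- def _expand_events_to_hops(raw_events, visited_by_tipo=None):
--     """Same result as the original, but relay search and dependency-graph
--     construction are driven by (tipo, position) dict indexes built in one pass
--     (no inner scans), and the final merge is a two-pointer run scan."""
--
--     def manhattan(a, b):
--         return abs(a[0] - b[0]) + abs(a[1] - b[1])
--
--     # Index events by (tipo, to_pos): list of (index, from_pos) in event order.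
--     by_dest = {}
--     for j, (t2, c2, fp2, tp2) in enumerate(raw_events):
--         by_dest.setdefault((t2, tp2), []).append((j, fp2))
--
--     raw_hops = []
--     for i, (tipo, count, from_pos, to_pos) in enumerate(raw_events):
--         if manhattan(from_pos, to_pos) == 1:
--             raw_hops.append((tipo, count, from_pos, to_pos))
--             continue
--         relay = None
--         for j, fp2 in by_dest.get((tipo, to_pos), []):
--             if j != i and manhattan(from_pos, fp2) == 1 and manhattan(fp2, to_pos) == 1:
--                 relay = fp2
--                 break
--         if relay is not None:
--             raw_hops.append((tipo, count, from_pos, relay))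
--             raw_hops.append((tipo, count, relay, to_pos))
--         else:
--             raw_hops.append((tipo, count, from_pos, to_pos))
--
--     n = len(raw_hops)
--
--     # Index hops by (tipo, from_pos); hop i depends on hop j iff
--     # tipo_j == tipo_i and to_pos_j == from_pos_i, so
--     # rdeps[j] = indices with from_pos == to_pos_j (same tipo), minus j itself.
--     by_src = {}
--     for i, (ti, ci, fpi, tpi) in enumerate(raw_hops):
--         by_src.setdefault((ti, fpi), []).append(i)
--
--     rdeps = []
--     in_degree = [0] * n
--     for j, (tj, cj, fpj, tpj) in enumerate(raw_hops):
--         rdeps.append([i for i in by_src.get((tj, tpj), []) if i != j])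
--     for j in range(n):
--         for i in rdeps[j]:
--             in_degree[i] += 1
--
--     from collections import deque
--     queue = deque(idx for idx in range(n) if in_degree[idx] == 0)
--     ordered_idx = []
--     while queue:
--         idx = queue.popleft()
--         ordered_idx.append(idx)
--         for dep_i in rdeps[idx]:
--             in_degree[dep_i] -= 1
--             if in_degree[dep_i] == 0:
--                 queue.append(dep_i)
--
--     if len(ordered_idx) < n:
--         seen = set(ordered_idx)
--         ordered_idx.extend(k for k in range(n) if k not in seen)
--     seq = [raw_hops[k] for k in ordered_idx]
--
--     # Merge consecutive runs with equal (tipo, from_pos, to_pos): two-pointer scan.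
--     out = []
--     i = 0
--     while i < n:
--         tipo, count, fp, tp = seq[i]
--         j = i + 1
--         while j < n and seq[j][0] == tipo and seq[j][2] == fp and seq[j][3] == tp:
--             count += seq[j][1]
--             j += 1
--         out.append((tipo, count, fp, tp))
--         i = j
--     return out
-- ===== Notes on version B (the rewrite author's own statement) =====
-- stated objective: faster
-- what changed: B indexes events/hops once by (tipo, to_pos) and (tipo, from_pos) dicts so the relay search and the dependency-graph construction are single passes with bucket lookups instead of A's nested scans over all events, and the final merge is a two-pointer run scan instead of A's rebuild-the-last-element loop.
import Mathlib
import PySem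

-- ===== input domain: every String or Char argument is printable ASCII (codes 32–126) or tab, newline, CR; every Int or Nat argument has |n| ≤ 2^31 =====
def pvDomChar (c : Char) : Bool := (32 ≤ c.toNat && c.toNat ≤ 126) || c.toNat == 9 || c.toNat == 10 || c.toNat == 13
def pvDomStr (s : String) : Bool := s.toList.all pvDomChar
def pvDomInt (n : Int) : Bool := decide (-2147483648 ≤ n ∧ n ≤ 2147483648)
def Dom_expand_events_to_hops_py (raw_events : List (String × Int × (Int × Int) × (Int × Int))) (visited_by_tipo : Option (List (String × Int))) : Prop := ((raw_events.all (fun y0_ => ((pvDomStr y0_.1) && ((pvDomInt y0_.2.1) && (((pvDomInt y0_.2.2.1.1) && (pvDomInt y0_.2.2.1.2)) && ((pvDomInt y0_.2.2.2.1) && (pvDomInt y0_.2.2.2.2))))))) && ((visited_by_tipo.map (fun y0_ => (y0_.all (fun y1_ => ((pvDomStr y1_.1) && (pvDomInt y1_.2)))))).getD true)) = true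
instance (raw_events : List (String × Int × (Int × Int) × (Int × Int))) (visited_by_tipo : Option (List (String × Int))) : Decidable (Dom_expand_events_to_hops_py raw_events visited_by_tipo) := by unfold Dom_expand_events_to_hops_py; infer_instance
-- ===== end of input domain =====

-- B replaces A's quadratic inner scans (relay search, dependency-graph build) by one-pass
-- (tipo, position) dict indexes and the last-element merge loop by a two-pointer run scan;
-- same return value (A mutates nothing observable). Objective: faster (asymptotic).

-- ===== PORT A =====
-- Events are tuples (tipo, count, from_pos, to_pos). Python indexing raw_events[i] is always
-- in range here, so the Nat-indexed getD with a dummy default is exact.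
def pvE (xs : List (String × Int × (Int × Int) × (Int × Int))) (k : Nat) :
    String × Int × (Int × Int) × (Int × Int) := xs.getD k ("", 0, (0, 0), (0, 0))

def pvMan (a b : Int × Int) : Int := |a.1 - b.1| + |a.2 - b.2|

-- A's inner relay scan over all raw_events (first match, as the Python for/break).
def pvRelayA (raw : List (String × Int × (Int × Int) × (Int × Int))) (i : Nat) :
    Option (Int × Int) :=
  ((List.range raw.length).find? (fun j =>
      j != i && (pvE raw j).1 == (pvE raw i).1 && (pvE raw j).2.2.2 == (pvE raw i).2.2.2
        && pvMan (pvE raw i).2.2.1 (pvE raw j).2.2.1 == 1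
        && pvMan (pvE raw j).2.2.1 (pvE raw i).2.2.2 == 1)).map
    (fun j => (pvE raw j).2.2.1)

-- Step 1 of A: expand non-adjacent events using the relay found by the inner scan.
-- (Python's 'if relay:' is always true when a relay tuple was found.)
def pvStep1A (raw : List (String × Int × (Int × Int) × (Int × Int))) :
    List (String × Int × (Int × Int) × (Int × Int)) :=
  (List.range raw.length).foldl (fun acc i =>
    let e := pvE raw i
    if pvMan e.2.2.1 e.2.2.2 == 1 then acc ++ [e]
    else match pvRelayA raw i with
      | some r => acc ++ [(e.1, e.2.1, e.2.2.1, r), (e.1, e.2.1, r, e.2.2.2)]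
      | none => acc ++ [e]) []

-- Step 2 of A: the double loop building in_degree (list) and rdeps (defaultdict).
def pvGraphA (hops : List (String × Int × (Int × Int) × (Int × Int))) :
    List Int × PySem.Dict Nat (List Nat) :=
  (List.range hops.length).foldl (fun st i =>
    (List.range hops.length).foldl (fun st j =>
      if j == i then st
      else if (pvE hops j).1 == (pvE hops i).1 && (pvE hops j).2.2.2 == (pvE hops i).2.2.1 then
        (st.1.set i (st.1.getD i 0 + 1), st.2.modify j [] (· ++ [i]))
      else st) st)
    (List.replicate hops.length (0 : Int), PySem.Dict.empty)

-- Kahn's queue loop — textually identical in A and in B (Source B), so it is one shared helper.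
-- It tracks popped INDICES (Python appends raw_hops[idx]; the hops are mapped at the end).
-- Each index is enqueued at most once, so fuel = number of hops never runs out.
def pvKahn (rdeps : Nat → List Nat) : Nat → List Nat → List Int → List Nat → List Nat
  | 0, _, _, ordered => ordered
  | _ + 1, [], _, ordered => ordered
  | fuel + 1, idx :: rest, indeg, ordered =>
      let st := (rdeps idx).foldl (fun (st : List Int × List Nat) dep =>
          let ind := st.1.set dep (st.1.getD dep 0 - 1)
          (ind, if ind.getD dep 0 == 0 then st.2 ++ [dep] else st.2)) (indeg, rest)
      pvKahn rdeps fuel st.2 st.1 (ordered ++ [idx])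

-- Cycle fallback, identical in both Pythons: append the not-yet-emitted hops in index order
-- (Python tracks emitted hops by id(); the freshly built tuples make that index identity).
def pvFinish (n : Nat) (ordIdx : List Nat) : List Nat :=
  if ordIdx.length < n then ordIdx ++ (List.range n).filter (fun k => !(ordIdx.contains k))
  else ordIdx

-- A's merge: compare with merged[-1], replace it on a match ('merged[-1] = (...)').
def pvMergeA (xs : List (String × Int × (Int × Int) × (Int × Int))) :
    List (String × Int × (Int × Int) × (Int × Int)) :=
  xs.foldl (fun merged e =>
    match merged.getLast? with
    | some l =>
        if l.1 == e.1 && l.2.2.1 == e.2.2.1 && l.2.2.2 == e.2.2.2 then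
          merged.dropLast ++ [(l.1, l.2.1 + e.2.1, l.2.2.1, l.2.2.2)]
        else merged ++ [e]
    | none => merged ++ [e]) []

def expand_events_to_hops_py (raw_events : List (String × Int × (Int × Int) × (Int × Int))) (visited_by_tipo : Option (List (String × Int))) : List (String × Int × (Int × Int) × (Int × Int)) :=
  let hops := pvStep1A raw_events
  let n := hops.length
  let st := pvGraphA hops
  let queue := (List.range n).filter (fun idx => st.1.getD idx 0 == 0)
  let ordIdx := pvKahn (fun j => st.2.getD j []) n queue st.1 []
  pvMergeA ((pvFinish n ordIdx).map (pvE hops))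

-- ===== PORT B =====
-- by_dest: (tipo, to_pos) ↦ [(index, from_pos)] in event order, built in one pass.
def pvByDest (raw : List (String × Int × (Int × Int) × (Int × Int))) :
    PySem.Dict (String × (Int × Int)) (List (Nat × (Int × Int))) :=
  (List.range raw.length).foldl (fun d j =>
    let e := pvE raw j
    d.modify (e.1, e.2.2.2) [] (· ++ [(j, e.2.2.1)])) PySem.Dict.empty

-- B's relay search: first match inside the (tipo, to_pos) bucket only.
def pvRelayB (d : PySem.Dict (String × (Int × Int)) (List (Nat × (Int × Int))))
    (raw : List (String × Int × (Int × Int) × (Int × Int))) (i : Nat) : Option (Int × Int) :=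
  let e := pvE raw i
  ((d.getD (e.1, e.2.2.2) []).find? (fun p =>
      p.1 != i && pvMan e.2.2.1 p.2 == 1 && pvMan p.2 e.2.2.2 == 1)).map (·.2)

def pvStep1B (raw : List (String × Int × (Int × Int) × (Int × Int))) :
    List (String × Int × (Int × Int) × (Int × Int)) :=
  let d := pvByDest raw
  (List.range raw.length).foldl (fun acc i =>
    let e := pvE raw i
    if pvMan e.2.2.1 e.2.2.2 == 1 then acc ++ [e]
    else match pvRelayB d raw i with
      | some r => acc ++ [(e.1, e.2.1, e.2.2.1, r), (e.1, e.2.1, r, e.2.2.2)]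
      | none => acc ++ [e]) []

-- by_src: (tipo, from_pos) ↦ [hop index] in hop order.
def pvBySrc (hops : List (String × Int × (Int × Int) × (Int × Int))) :
    PySem.Dict (String × (Int × Int)) (List Nat) :=
  (List.range hops.length).foldl (fun d i =>
    let e := pvE hops i
    d.modify (e.1, e.2.2.1) [] (· ++ [i])) PySem.Dict.empty

-- rdeps[j] = indices with from_pos = to_pos_j and the same tipo, minus j itself.
def pvRdepsB (hops : List (String × Int × (Int × Int) × (Int × Int))) : List (List Nat) :=
  let d := pvBySrc hops
  (List.range hops.length).map (fun j =>
    let e := pvE hops j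
    (d.getD (e.1, e.2.2.2) []).filter (fun i => i != j))

-- in_degree accumulated from the rdeps lists.
def pvIndegB (hops : List (String × Int × (Int × Int) × (Int × Int))) : List Int :=
  (pvRdepsB hops).foldl (fun arr is => is.foldl (fun a i => a.set i (a.getD i 0 + 1)) arr)
    (List.replicate hops.length (0 : Int))

-- The inner while of B's two-pointer merge: total count and remainder after a run.
def pvEatRun (key : String × (Int × Int) × (Int × Int)) :
    List (String × Int × (Int × Int) × (Int × Int)) →
      Int × List (String × Int × (Int × Int) × (Int × Int))
  | [] => (0, [])
  | e :: rest =>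
      if e.1 == key.1 && e.2.2.1 == key.2.1 && e.2.2.2 == key.2.2 then
        let r := pvEatRun key rest
        (e.2.1 + r.1, r.2)
      else (0, e :: rest)

theorem pvEatRun_length_le (key : String × (Int × Int) × (Int × Int))
    (xs : List (String × Int × (Int × Int) × (Int × Int))) :
    (pvEatRun key xs).2.length ≤ xs.length := by
  induction xs with
  | nil => simp [pvEatRun]
  | cons e rest ih =>
      rw [pvEatRun]
      split
      · exact Nat.le_succ_of_le ih
      · exact Nat.le_refl _

-- B's outer merge loop: emit one merged hop per run.
def pvMergeB : List (String × Int × (Int × Int) × (Int × Int)) →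
    List (String × Int × (Int × Int) × (Int × Int))
  | [] => []
  | e :: xs =>
      let r := pvEatRun (e.1, e.2.2.1, e.2.2.2) xs
      (e.1, e.2.1 + r.1, e.2.2.1, e.2.2.2) :: pvMergeB r.2
  termination_by xs => xs.length
  decreasing_by
    exact Nat.lt_succ_of_le (pvEatRun_length_le _ _)

def expand_events_to_hops_py_alt (raw_events : List (String × Int × (Int × Int) × (Int × Int))) (visited_by_tipo : Option (List (String × Int))) : List (String × Int × (Int × Int) × (Int × Int)) :=
  let hops := pvStep1B raw_events
  let n := hops.length
  let rdeps := pvRdepsB hops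
  let indeg := pvIndegB hops
  let queue := (List.range n).filter (fun idx => indeg.getD idx 0 == 0)
  let ordIdx := pvKahn (fun j => rdeps.getD j []) n queue indeg []
  pvMergeB ((pvFinish n ordIdx).map (pvE hops))

-- ===== PRECONDITION & SPEC =====
def Spec_expand_events_to_hops_py (raw_events : List (String × Int × (Int × Int) × (Int × Int))) (visited_by_tipo : Option (List (String × Int))) (out : List (String × Int × (Int × Int) × (Int × Int))) : Prop := out = expand_events_to_hops_py_alt raw_events visited_by_tipo
instance (raw_events : List (String × Int × (Int × Int) × (Int × Int))) (visited_by_tipo : Option (List (String × Int))) (out : List (String × Int × (Int × Int) × (Int × Int))) : Decidable (Spec_expand_events_to_hops_py raw_events visited_by_tipo out) := by unfold Spec_expand_events_to_hops_py; infer_instance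

-- ===== CLAIM (what is proved, stated in full; the proofs are below) =====
def Claim_equal_expand_events_to_hops_py : Prop := ∀ (raw_events : List (String × Int × (Int × Int) × (Int × Int))) (visited_by_tipo : Option (List (String × Int))), Dom_expand_events_to_hops_py raw_events visited_by_tipo → Spec_expand_events_to_hops_py raw_events visited_by_tipo (expand_events_to_hops_py raw_events visited_by_tipo)

-- ===== LEMMAS AND PROOFS =====

theorem pv_find?_congr {α : Type} (l : List α) (p q : α → Bool)
    (h : ∀ x ∈ l, p x = q x) : l.find? p = l.find? q := by
  induction l with
  | nil => rfl
  | cons a t ih =>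
      simp only [List.find?_cons, h a (List.mem_cons_self)]
      split <;> [rfl; exact ih (fun x hx => h x (List.mem_cons_of_mem _ hx))]

theorem pv_find?_filter_map {α β : Type} (l : List α) (q : α → Bool) (g : α → β)
    (p : β → Bool) :
    ((l.filter q).map g).find? p = (l.find? (fun x => q x && p (g x))).map g := by
  induction l with
  | nil => rfl
  | cons a t ih =>
      by_cases hq : q a = true
      · by_cases hp : p (g a) = true
        · simp [hq, hp]
        · simp only [List.filter_cons, hq, if_true, List.map_cons, List.find?_cons]
          simp [hp, ih]
      · simp only [List.filter_cons, hq]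
        simp [hq, ih]

theorem pv_byDest_getD (raw : List (String × Int × (Int × Int) × (Int × Int)))
    (c : String × (Int × Int)) :
    (pvByDest raw).getD c []
      = ((List.range raw.length).filter
            (fun j => (((pvE raw j).1, (pvE raw j).2.2.2) : String × (Int × Int)) == c)).map
          (fun j => (j, (pvE raw j).2.2.1)) := by
  unfold pvByDest
  have : (List.range raw.length).foldl
        (fun d j => let e := pvE raw j; d.modify (e.1, e.2.2.2) [] (· ++ [(j, e.2.2.1)]))
        PySem.Dict.empty
      = ((List.range raw.length).map
          (fun j => ((((pvE raw j).1, (pvE raw j).2.2.2) : String × (Int × Int)),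
                     (j, (pvE raw j).2.2.1)))).foldl
          (fun d p => d.modify p.1 [] (· ++ [p.2])) PySem.Dict.empty := by
    rw [List.foldl_map]
  rw [this, PySem.Dict.getD_foldl_modify_append]
  simp [List.filter_map, List.map_map, Function.comp_def]

theorem pv_relay_eq (raw : List (String × Int × (Int × Int) × (Int × Int))) (i : Nat) :
    pvRelayB (pvByDest raw) raw i = pvRelayA raw i := by
  unfold pvRelayB pvRelayA
  simp only [pv_byDest_getD, pv_find?_filter_map, Option.map_map]
  rw [pv_find?_congr _ _
      (fun j => j != i && (pvE raw j).1 == (pvE raw i).1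
        && (pvE raw j).2.2.2 == (pvE raw i).2.2.2
        && pvMan (pvE raw i).2.2.1 (pvE raw j).2.2.1 == 1
        && pvMan (pvE raw j).2.2.1 (pvE raw i).2.2.2 == 1)]
  · rfl
  · intro j _
    rw [Bool.eq_iff_iff]
    simp only [Bool.and_eq_true, beq_iff_eq, Prod.ext_iff]
    tauto

theorem pv_step1_eq (raw : List (String × Int × (Int × Int) × (Int × Int))) :
    pvStep1B raw = pvStep1A raw := by
  unfold pvStep1B pvStep1A
  apply PySem.List.foldl_congr_mem
  intro acc i _
  simp only [pv_relay_eq]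

-- The Bool condition of A's double loop (outer index i, inner index j).
def pvPb (hops : List (String × Int × (Int × Int) × (Int × Int))) (i j : Nat) : Bool :=
  j != i && (pvE hops j).1 == (pvE hops i).1 && (pvE hops j).2.2.2 == (pvE hops i).2.2.1

theorem pvGraphA_eq (hops : List (String × Int × (Int × Int) × (Int × Int))) :
    pvGraphA hops =
      ((List.range hops.length).foldl (fun a i =>
          (List.range hops.length).foldl
            (fun a j => if pvPb hops i j then a.set i (a.getD i 0 + 1) else a) a)
        (List.replicate hops.length (0 : Int)),
       (List.range hops.length).foldl (fun d i =>
          (List.range hops.length).foldl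
            (fun d j => if pvPb hops i j then d.modify j [] (· ++ [i]) else d) d)
        PySem.Dict.empty) := by
  have hbody : ∀ (i : Nat) (st : List Int × PySem.Dict Nat (List Nat)) (j : Nat),
      (if j == i then st
       else if (pvE hops j).1 == (pvE hops i).1 && (pvE hops j).2.2.2 == (pvE hops i).2.2.1 then
         (st.1.set i (st.1.getD i 0 + 1), st.2.modify j [] (· ++ [i]))
       else st)
      = ((if pvPb hops i j then st.1.set i (st.1.getD i 0 + 1) else st.1),
         (if pvPb hops i j then st.2.modify j [] (· ++ [i]) else st.2)) := by
    intro i st j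
    by_cases hji : j = i
    · simp [pvPb, hji]
    · have hne : (j == i) = false := beq_false_of_ne hji
      have hb : pvPb hops i j
          = ((pvE hops j).1 == (pvE hops i).1 && (pvE hops j).2.2.2 == (pvE hops i).2.2.1) := by
        unfold pvPb
        simp [bne, hne]
      rw [hb]
      simp only [hne, Bool.false_eq_true, if_false]
      by_cases hc : ((pvE hops j).1 == (pvE hops i).1
          && (pvE hops j).2.2.2 == (pvE hops i).2.2.1) = true
      · simp [hc]
      · simp only [Bool.not_eq_true] at hc
        simp [hc]
  have houter : (fun (st : List Int × PySem.Dict Nat (List Nat)) (i : Nat) =>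
      (List.range hops.length).foldl (fun st j =>
        if j == i then st
        else if (pvE hops j).1 == (pvE hops i).1 && (pvE hops j).2.2.2 == (pvE hops i).2.2.1 then
          (st.1.set i (st.1.getD i 0 + 1), st.2.modify j [] (· ++ [i]))
        else st) st)
      = (fun st i =>
          ((List.range hops.length).foldl
             (fun a j => if pvPb hops i j then a.set i (a.getD i 0 + 1) else a) st.1,
           (List.range hops.length).foldl
             (fun d j => if pvPb hops i j then d.modify j [] (· ++ [i]) else d) st.2)) := by
    funext st i
    obtain ⟨a, b⟩ := st
    rw [show (fun (st : List Int × PySem.Dict Nat (List Nat)) (j : Nat) =>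
          if j == i then st
          else if (pvE hops j).1 == (pvE hops i).1
              && (pvE hops j).2.2.2 == (pvE hops i).2.2.1 then
            (st.1.set i (st.1.getD i 0 + 1), st.2.modify j [] (· ++ [i]))
          else st)
        = (fun (st : List Int × PySem.Dict Nat (List Nat)) (j : Nat) =>
            ((if pvPb hops i j then st.1.set i (st.1.getD i 0 + 1) else st.1),
             (if pvPb hops i j then st.2.modify j [] (· ++ [i]) else st.2)))
      from funext₂ (hbody i)]
    exact PySem.List.foldl_prod_mk
      (f := fun (a : List Int) (j : Nat) => if pvPb hops i j then a.set i (a.getD i 0 + 1) else a)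
      (g := fun (d : PySem.Dict Nat (List Nat)) (j : Nat) =>
        if pvPb hops i j then d.modify j [] (· ++ [i]) else d) _ _ _
  unfold pvGraphA
  rw [houter]
  exact PySem.List.foldl_prod_mk
    (f := fun (a : List Int) (i : Nat) => (List.range hops.length).foldl
        (fun a j => if pvPb hops i j then a.set i (a.getD i 0 + 1) else a) a)
    (g := fun (d : PySem.Dict Nat (List Nat)) (i : Nat) => (List.range hops.length).foldl
        (fun d j => if pvPb hops i j then d.modify j [] (· ++ [i]) else d) d) _ _ _

theorem pv_getD_nested_modify (ks : Nat → List Nat) (c : Nat) :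
    ∀ (outer : List Nat) (d : PySem.Dict Nat (List Nat)),
    (outer.foldl (fun d i => (ks i).foldl (fun d j => d.modify j [] (· ++ [i])) d) d).getD c []
      = d.getD c [] ++ outer.flatMap (fun i => ((ks i).filter (· == c)).map (fun _ => i)) := by
  intro outer
  induction outer with
  | nil => simp
  | cons i rest ih =>
      intro d
      rw [List.foldl_cons, ih]
      have : ((ks i).foldl (fun d j => d.modify j [] (· ++ [i])) d)
          = (((ks i).map (fun j => (j, i))).foldl
              (fun d p => d.modify p.1 [] (· ++ [p.2])) d) := by
        rw [List.foldl_map]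
      rw [this, PySem.Dict.getD_foldl_modify_append]
      simp [List.filter_map, List.map_map, Function.comp_def, List.append_assoc]

theorem pv_filter_beq_singleton (c : Nat) (q : Nat → Bool) :
    ∀ (l : List Nat), l.Nodup →
      l.filter (fun j => j == c && q j) = if c ∈ l ∧ q c = true then [c] else [] := by
  intro l
  induction l with
  | nil => simp
  | cons a t ih =>
      intro h
      rw [List.nodup_cons] at h
      by_cases hac : a = c
      · subst hac
        by_cases hq : q a = true
        · simp [hq, h.1, ih h.2]
        · simp [hq, ih h.2, h.1]

      · by_cases hq : (a == c && q a) = true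
        · simp only [Bool.and_eq_true, beq_iff_eq] at hq
          exact absurd hq.1 hac
        · simp only [List.filter_cons, hq]
          rw [ih h.2]
          simp [Ne.symm hac]

theorem pv_flatMap_ite (P : Nat → Prop) [DecidablePred P] :
    ∀ (l : List Nat), l.flatMap (fun i => if P i then [i] else []) = l.filter (fun i => decide (P i)) := by
  intro l
  induction l with
  | nil => rfl
  | cons a t ih =>
      by_cases h : P a
      · simp [h, ih]
      · simp [h, ih]

theorem pv_bySrc_getD (hops : List (String × Int × (Int × Int) × (Int × Int)))
    (c : String × (Int × Int)) :
    (pvBySrc hops).getD c []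
      = (List.range hops.length).filter
          (fun i => (((pvE hops i).1, (pvE hops i).2.2.1) : String × (Int × Int)) == c) := by
  unfold pvBySrc
  have : (List.range hops.length).foldl
        (fun d i => let e := pvE hops i; d.modify (e.1, e.2.2.1) [] (· ++ [i]))
        PySem.Dict.empty
      = ((List.range hops.length).map
          (fun i => ((((pvE hops i).1, (pvE hops i).2.2.1) : String × (Int × Int)), i))).foldl
          (fun d p => d.modify p.1 [] (· ++ [p.2])) PySem.Dict.empty := by
    rw [List.foldl_map]
  rw [this, PySem.Dict.getD_foldl_modify_append]
  simp [List.filter_map, List.map_map, Function.comp_def]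

theorem pv_rdepsB_getD (hops : List (String × Int × (Int × Int) × (Int × Int))) (c : Nat) :
    (pvRdepsB hops).getD c []
      = if c < hops.length then
          ((List.range hops.length).filter
            (fun i => (((pvE hops i).1, (pvE hops i).2.2.1) : String × (Int × Int))
                == (((pvE hops c).1, (pvE hops c).2.2.2) : String × (Int × Int)))).filter
            (fun i => i != c)
        else [] := by
  unfold pvRdepsB
  rw [List.getD_eq_getElem?_getD, List.getElem?_map]
  by_cases h : c < hops.length
  · simp [h, pv_bySrc_getD]
  · simp [h]

theorem pv_rdeps_eq (hops : List (String × Int × (Int × Int) × (Int × Int))) (c : Nat) :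
    (pvRdepsB hops).getD c [] = (pvGraphA hops).2.getD c [] := by
  rw [pv_rdepsB_getD, pvGraphA_eq]
  have hsplit : ∀ (i : Nat) (d : PySem.Dict Nat (List Nat)),
      (List.range hops.length).foldl
          (fun (d : PySem.Dict Nat (List Nat)) (j : Nat) =>
            if pvPb hops i j then d.modify j [] (· ++ [i]) else d) d
        = ((List.range hops.length).filter (pvPb hops i)).foldl
            (fun d j => d.modify j [] (· ++ [i])) d := by
    intro i d
    exact PySem.List.foldl_if_eq_foldl_filter _ _ _ _
  simp only [hsplit]
  rw [pv_getD_nested_modify (ks := fun i => (List.range hops.length).filter (pvPb hops i))]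
  simp only [PySem.Dict.getD_empty, List.nil_append]
  have hinner : ∀ i : Nat,
      (((List.range hops.length).filter (pvPb hops i)).filter (fun j => j == c)).map
          (fun _ => i)
        = if c < hops.length ∧ pvPb hops i c = true then [i] else [] := by
    intro i
    rw [List.filter_filter, pv_filter_beq_singleton c (pvPb hops i) _ (List.nodup_range)]
    simp only [List.mem_range]
    by_cases h : c < hops.length ∧ pvPb hops i c = true
    · simp [h]
    · simp [h]
  simp only [hinner]
  rw [pv_flatMap_ite (P := fun i => c < hops.length ∧ pvPb hops i c = true)]
  by_cases hc : c < hops.length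
  · simp only [hc, if_true, List.filter_filter]
    apply List.filter_congr
    intro i hi
    rw [Bool.eq_iff_iff]
    simp only [decide_eq_true_eq, Bool.and_eq_true, bne_iff_ne, beq_iff_eq, Prod.ext_iff,
      pvPb, ne_eq, true_and]
    constructor
    · intro h
      refine ⟨⟨fun e => h.1 e.symm, h.2.1.symm⟩, ?_⟩
      exact ⟨(h.2.2.1).symm, (h.2.2.2).symm⟩
    · intro h
      refine ⟨fun e => h.1.1 e.symm, h.1.2.symm, ?_⟩
      exact ⟨h.2.1.symm, h.2.2.symm⟩
  · simp [hc]

theorem pv_bump_length (bl : List Nat) :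
    ∀ (arr : List Int),
      (bl.foldl (fun a k => a.set k (a.getD k 0 + 1)) arr).length = arr.length := by
  induction bl with
  | nil => intro arr; rfl
  | cons k t ih =>
      intro arr
      rw [List.foldl_cons, ih]
      simp

theorem pv_bump_getD (m : Nat) (bl : List Nat) :
    ∀ (arr : List Int), (∀ k ∈ bl, k < arr.length) →
      (bl.foldl (fun a k => a.set k (a.getD k 0 + 1)) arr).getD m 0
        = arr.getD m 0 + (bl.count m : Int) := by
  induction bl with
  | nil => intro arr _; simp
  | cons k t ih =>
      intro arr hk
      rw [List.foldl_cons,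
        ih _ (fun x hx => by
          simpa using hk x (List.mem_cons_of_mem _ hx))]
      have hklt : k < arr.length := hk k List.mem_cons_self
      have hset : (arr.set k (arr.getD k 0 + 1)).getD m 0
          = if k = m then arr.getD k 0 + 1 else arr.getD m 0 := by
        by_cases h : k = m
        · subst h
          rw [if_pos rfl, List.getD_eq_getElem?_getD, List.getElem?_set, if_pos rfl,
            if_pos hklt]
          rfl
        · rw [if_neg h, List.getD_eq_getElem?_getD, List.getElem?_set, if_neg h,
            ← List.getD_eq_getElem?_getD]
      rw [hset, List.count_cons]
      by_cases h : k = m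
      · subst h
        simp only [BEq.rfl, if_true]
        push_cast
        ring
      · simp [h]

theorem pv_count_map_const {α : Type} (m i : Nat) (l : List α) :
    ((l.map (fun _ => i)).count m) = if i = m then l.length else 0 := by
  induction l with
  | nil => simp
  | cons x t ih =>
      simp only [List.map_cons, List.count_cons, ih]
      by_cases h : i = m
      · simp [h]
      · simp [h]

theorem pv_sum_delta (m : Nat) (x : Nat → Nat) :
    ∀ l : List Nat, l.Nodup →
      (l.map (fun i => if i = m then x i else 0)).sum = if m ∈ l then x m else 0 := by
  intro l
  induction l with
  | nil => simp
  | cons a t ih =>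
      intro h
      rw [List.nodup_cons] at h
      simp only [List.map_cons, List.sum_cons, ih h.2]
      by_cases ham : a = m
      · subst ham
        simp [h.1]
      · simp [ham, List.mem_cons, Ne.symm ham]

theorem pv_sum_indicator (P : Nat → Bool) :
    ∀ l : List Nat, (l.map (fun j => if P j then 1 else 0)).sum = l.countP P := by
  intro l
  induction l with
  | nil => simp
  | cons a t ih =>
      simp only [List.map_cons, List.sum_cons, ih, List.countP_cons]
      by_cases h : P a = true
      · simp [h, Nat.add_comm]
      · simp only [Bool.not_eq_true] at h
        simp [h]

theorem pv_indeg_eq (hops : List (String × Int × (Int × Int) × (Int × Int))) :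
    pvIndegB hops = (pvGraphA hops).1 := by
  rw [pvGraphA_eq]
  have hsplitA : ∀ (i : Nat) (a : List Int),
      (List.range hops.length).foldl
          (fun a j => if pvPb hops i j then a.set i (a.getD i 0 + 1) else a) a
        = (((List.range hops.length).filter (pvPb hops i)).map (fun _ => i)).foldl
            (fun a k => a.set k (a.getD k 0 + 1)) a := by
    intro i a
    rw [List.foldl_map]
    exact PySem.List.foldl_if_eq_foldl_filter _ _ _ _
  simp only [hsplitA]
  rw [← List.foldl_flatMap]
  have hBflat : pvIndegB hops
      = ((List.range hops.length).flatMap (fun j =>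
          ((pvBySrc hops).getD ((pvE hops j).1, (pvE hops j).2.2.2) []).filter
            (fun i => i != j))).foldl
          (fun a k => a.set k (a.getD k 0 + 1)) (List.replicate hops.length (0 : Int)) := by
    unfold pvIndegB pvRdepsB
    rw [List.foldl_map, ← List.foldl_flatMap]
  rw [hBflat]
  have hFmem : ∀ j k, k ∈ ((pvBySrc hops).getD ((pvE hops j).1, (pvE hops j).2.2.2) []).filter
      (fun i => i != j) → k < hops.length := by
    intro j k hk
    rw [pv_bySrc_getD] at hk
    simp only [List.mem_filter, List.mem_range] at hk
    exact hk.1.1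
  have hLBmem : ∀ k ∈ (List.range hops.length).flatMap (fun j =>
      ((pvBySrc hops).getD ((pvE hops j).1, (pvE hops j).2.2.2) []).filter (fun i => i != j)),
      k < (List.replicate hops.length (0 : Int)).length := by
    intro k hk
    rw [List.mem_flatMap] at hk
    obtain ⟨j, -, hkj⟩ := hk
    simpa using hFmem j k hkj
  have hLAmem : ∀ k ∈ (List.range hops.length).flatMap (fun i =>
      ((List.range hops.length).filter (pvPb hops i)).map (fun _ => i)),
      k < (List.replicate hops.length (0 : Int)).length := by
    intro k hk
    rw [List.mem_flatMap] at hk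
    obtain ⟨i, hi, hki⟩ := hk
    simp only [List.mem_map] at hki
    obtain ⟨-, -, rfl⟩ := hki
    simpa using List.mem_range.mp hi
  -- counts agree
  have hcount : ∀ m, m < hops.length →
      ((List.range hops.length).flatMap (fun j =>
        ((pvBySrc hops).getD ((pvE hops j).1, (pvE hops j).2.2.2) []).filter
          (fun i => i != j))).count m
      = ((List.range hops.length).flatMap (fun i =>
        ((List.range hops.length).filter (pvPb hops i)).map (fun _ => i))).count m := by
    intro m hm
    rw [List.count_flatMap, List.count_flatMap]
    -- A side: delta sum
    have hA : (List.map ((List.count m) ∘ fun i =>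
          ((List.range hops.length).filter (pvPb hops i)).map (fun _ => i))
          (List.range hops.length)).sum
        = ((List.range hops.length).filter (pvPb hops m)).length := by
      simp only [Function.comp_def]
      rw [List.map_congr_left (g := fun i =>
          if i = m then ((List.range hops.length).filter (pvPb hops i)).length else 0)
          (fun i _ => pv_count_map_const m i _)]
      rw [pv_sum_delta m (fun i => ((List.range hops.length).filter (pvPb hops i)).length)
          _ List.nodup_range]
      simp [List.mem_range, hm]
    -- B side: indicator sum
    have hB : (List.map ((List.count m) ∘ fun j =>
          ((pvBySrc hops).getD ((pvE hops j).1, (pvE hops j).2.2.2) []).filter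
            (fun i => i != j)) (List.range hops.length)).sum
        = (List.range hops.length).countP (fun j => pvPb hops m j) := by
      simp only [Function.comp_def]
      have hone : ∀ j, (List.count m (((pvBySrc hops).getD
            ((pvE hops j).1, (pvE hops j).2.2.2) []).filter (fun i => i != j)))
          = if pvPb hops m j then 1 else 0 := by
        intro j
        have hnd : (((pvBySrc hops).getD ((pvE hops j).1, (pvE hops j).2.2.2) []).filter
            (fun i => i != j)).Nodup := by
          rw [pv_bySrc_getD]
          exact (List.nodup_range.filter _).filter _
        have hmem : m ∈ ((pvBySrc hops).getD ((pvE hops j).1, (pvE hops j).2.2.2) []).filter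
            (fun i => i != j) ↔ pvPb hops m j = true := by
          rw [pv_bySrc_getD]
          simp only [List.mem_filter, List.mem_range, pvPb, Bool.and_eq_true, bne_iff_ne,
            beq_iff_eq, Prod.ext_iff, ne_eq, hm, true_and]
          constructor
          · intro h
            exact ⟨⟨fun e => h.2 e.symm, h.1.1.symm⟩, h.1.2.1.symm, h.1.2.2.symm⟩
          · intro h
            exact ⟨⟨h.1.2.symm, h.2.1.symm, h.2.2.symm⟩, fun e => h.1.1 e.symm⟩
        by_cases h : pvPb hops m j = true
        · rw [h, if_pos rfl]
          exact List.count_eq_one_of_mem hnd (hmem.mpr h)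
        · simp only [Bool.not_eq_true] at h
          rw [h]
          simp only [Bool.false_eq_true, if_false]
          exact List.count_eq_zero_of_not_mem (fun hc => by
            have := hmem.mp hc
            rw [h] at this
            exact Bool.false_ne_true this)
      rw [List.map_congr_left (g := fun j => if pvPb hops m j then 1 else 0)
          (fun j _ => hone j)]
      exact pv_sum_indicator (fun j => pvPb hops m j) _
    rw [hA, hB, List.countP_eq_length_filter]
  -- list extensionality
  apply List.ext_getElem
  · rw [pv_bump_length, pv_bump_length]
  · intro m h1 h2
    have hm : m < hops.length := by
      rw [pv_bump_length] at h1
      simpa using h1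
    rw [← List.getD_eq_getElem _ (0 : Int) h1, ← List.getD_eq_getElem _ (0 : Int) h2]
    rw [pv_bump_getD _ _ _ hLBmem, pv_bump_getD _ _ _ hLAmem]
    rw [hcount m hm]

theorem pv_mergeA_aux (xs : List (String × Int × (Int × Int) × (Int × Int))) :
    ∀ (acc : List (String × Int × (Int × Int) × (Int × Int))) (t : String) (c : Int)
      (f p : Int × Int),
    xs.foldl (fun merged e =>
      match merged.getLast? with
      | some l =>
          if l.1 == e.1 && l.2.2.1 == e.2.2.1 && l.2.2.2 == e.2.2.2 then
            merged.dropLast ++ [(l.1, l.2.1 + e.2.1, l.2.2.1, l.2.2.2)]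
          else merged ++ [e]
      | none => merged ++ [e]) (acc ++ [(t, c, f, p)])
    = acc ++ (t, c + (pvEatRun (t, f, p) xs).1, f, p) :: pvMergeB (pvEatRun (t, f, p) xs).2 := by
  induction xs with
  | nil => intro acc t c f p; simp [pvEatRun, pvMergeB]
  | cons e rest ih =>
      intro acc t c f p
      rw [List.foldl_cons]
      have hlast : (acc ++ [(t, c, f, p)]).getLast? = some (t, c, f, p) := by simp
      have htest : (e.1 == t && e.2.2.1 == f && e.2.2.2 == p)
          = (t == e.1 && f == e.2.2.1 && p == e.2.2.2) := by
        rw [Bool.eq_iff_iff]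
        simp only [Bool.and_eq_true, beq_iff_eq]
        tauto
      rw [pvEatRun, htest]
      by_cases h : (t == e.1 && f == e.2.2.1 && p == e.2.2.2) = true
      · simp only [hlast, h, if_true]
        rw [List.dropLast_concat]
        rw [ih acc t (c + e.2.1) f p]
        simp [add_assoc]
      · simp only [Bool.not_eq_true] at h
        simp only [hlast, h, Bool.false_eq_true, if_false]
        have : (acc ++ [(t, c, f, p)]) ++ [e]
            = (acc ++ [(t, c, f, p)]) ++ [(e.1, e.2.1, e.2.2.1, e.2.2.2)] := rfl
        rw [this, ih (acc ++ [(t, c, f, p)]) e.1 e.2.1 e.2.2.1 e.2.2.2]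
        rw [pvMergeB]
        simp

theorem pv_merge_eq (xs : List (String × Int × (Int × Int) × (Int × Int))) :
    pvMergeA xs = pvMergeB xs := by
  cases xs with
  | nil => simp [pvMergeA, pvMergeB]
  | cons e rest =>
      unfold pvMergeA
      rw [List.foldl_cons]
      have h0 : (([] : List (String × Int × (Int × Int) × (Int × Int))).getLast?) = none := rfl
      simp only [h0]
      have : ([] : List (String × Int × (Int × Int) × (Int × Int))) ++ [e]
          = [] ++ [(e.1, e.2.1, e.2.2.1, e.2.2.2)] := rfl
      rw [this, pv_mergeA_aux rest [] e.1 e.2.1 e.2.2.1 e.2.2.2, pvMergeB]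
      simp

-- ===== VERDICT (by name: the statement is the Claim_ definition above) =====
theorem expand_events_to_hops_py_spec : Claim_equal_expand_events_to_hops_py := by
  intro raw v _
  unfold Spec_expand_events_to_hops_py
  simp only [expand_events_to_hops_py, expand_events_to_hops_py_alt, pv_step1_eq,
    pv_indeg_eq, pv_merge_eq]
  rw [show (fun j => (pvRdepsB (pvStep1A raw)).getD j [])
        = (fun j => (pvGraphA (pvStep1A raw)).2.getD j []) from funext (pv_rdeps_eq _)]
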